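-- pv_equiv track=rewrite | github.com/aniketbharti/blockchain-project | app/src/app/pages/homepage/test.py | findEarliestMonth
-- ===== SOURCE A (Python) =====
-- def findEarliestMonth(stockPrice):
--     month = 0
--     change = max(stockPrice)
--     l = []
--     while(len(stockPrice) > 1):
--         l.append(stockPrice.pop(0))
--         avg1 = sum(l) // len(l)
--         avg2 = sum(stockPrice) // len(stockPrice)
--         if(abs(avg1-avg2) < change):
--             change = abs(avg1-avg2)
--             month = len(l)
--     return month
-- ===== SOURCE B (Python) =====
-- def findEarliestMonth(stockPrice):
--     n = len(stockPrice)
--     best = max(stockPrice)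
--     month = 0
--     left = 0
--     right = sum(stockPrice)
--     for k in range(1, n):
--         left += stockPrice[k - 1]
--         right -= stockPrice[k - 1]
--         d = abs(left // k - right // (n - k))
--         if d < best:
--             best = d
--             month = k
--     return month
-- ===== Notes on version B (the rewrite author's own statement) =====
-- stated objective: faster
-- what changed: Replaces A's while-loop that pops from the list and recomputes sum(l) and sum(stockPrice) from scratch each iteration with a single pass maintaining running left/right sums (and does not mutate the input list).
import Mathlib
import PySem

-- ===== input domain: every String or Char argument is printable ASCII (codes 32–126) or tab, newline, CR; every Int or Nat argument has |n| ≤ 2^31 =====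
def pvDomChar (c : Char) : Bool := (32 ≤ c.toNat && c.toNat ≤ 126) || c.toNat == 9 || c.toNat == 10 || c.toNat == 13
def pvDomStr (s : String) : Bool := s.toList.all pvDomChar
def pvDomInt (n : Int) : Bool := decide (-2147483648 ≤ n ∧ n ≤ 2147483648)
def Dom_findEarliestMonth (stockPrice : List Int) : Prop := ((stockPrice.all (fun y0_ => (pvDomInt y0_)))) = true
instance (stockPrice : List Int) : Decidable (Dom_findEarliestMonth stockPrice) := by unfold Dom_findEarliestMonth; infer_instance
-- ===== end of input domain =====

-- B replaces A's quadratic pop-and-resum loop with one pass over running left/right sums (O(n) vs O(n^2));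
-- A mutates its argument (pops it down to one element), B does not — the equivalence is about the return value.


-- ===== PORT A =====
-- while len(stockPrice) > 1: pop the head onto l, recompute both averages from scratch
def findEarliestMonthGoA (l : List Int) (rest : List Int) (change month : Int) : Int :=
  match rest with
  | [] => month
  | [_] => month
  | x :: xs =>
      let l' := l ++ [x]
      let avg1 := PySem.Int.floordiv l'.sum (l'.length : Int)
      let avg2 := PySem.Int.floordiv xs.sum (xs.length : Int)
      if |avg1 - avg2| < change then
        findEarliestMonthGoA l' xs |avg1 - avg2| (l'.length : Int)
      else
        findEarliestMonthGoA l' xs change month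

def findEarliestMonth (stockPrice : List Int) : Int :=
  match PySem.List.max? stockPrice (fun y => y) with
  | none => 0  -- max([]) raises ValueError; excluded by Pre_
  | some change => findEarliestMonthGoA [] stockPrice change 0

-- ===== PORT B =====
-- one pass: for k in range(1, n), maintain running left/right sums
def findEarliestMonthGoB (pending : List Int) (k left right best month : Int) : Int :=
  match pending with
  | [] => month
  | [_] => month
  | x :: xs =>
      let left' := left + x
      let right' := right - x
      let d := |PySem.Int.floordiv left' k - PySem.Int.floordiv right' (xs.length : Int)|
      if d < best then
        findEarliestMonthGoB xs (k + 1) left' right' d k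
      else
        findEarliestMonthGoB xs (k + 1) left' right' best month

def findEarliestMonth_alt (stockPrice : List Int) : Int :=
  match PySem.List.max? stockPrice (fun y => y) with
  | none => 0  -- max([]) raises ValueError; excluded by Pre_
  | some best => findEarliestMonthGoB stockPrice 1 0 stockPrice.sum best 0

-- ===== PRECONDITION & SPEC =====
-- Pre_ excludes exactly the empty list, on which A's max(stockPrice) raises ValueError (B raises there too).
def Pre_findEarliestMonth (stockPrice : List Int) : Prop := stockPrice ≠ []
instance (stockPrice : List Int) : Decidable (Pre_findEarliestMonth stockPrice) := by unfold Pre_findEarliestMonth; infer_instance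
def pvWitness_findEarliestMonth : List Int := [3, 1, 2]

def Spec_findEarliestMonth (stockPrice : List Int) (out : Int) : Prop := out = findEarliestMonth_alt stockPrice
instance (stockPrice : List Int) (out : Int) : Decidable (Spec_findEarliestMonth stockPrice out) := by unfold Spec_findEarliestMonth; infer_instance

-- ===== CLAIM (what is proved, stated in full; the proofs are below) =====
def Claim_equal_findEarliestMonth : Prop := ∀ (stockPrice : List Int), Dom_findEarliestMonth stockPrice → Pre_findEarliestMonth stockPrice → Spec_findEarliestMonth stockPrice (findEarliestMonth stockPrice)

-- ===== LEMMAS AND PROOFS =====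

-- loop correspondence: A's state (l, rest) matches B's state (rest, k = |l|+1, left = sum l, right = sum rest)
theorem go_eq (rest : List Int) : ∀ (l : List Int) (change month : Int),
    findEarliestMonthGoA l rest change month
      = findEarliestMonthGoB rest ((l.length : Int) + 1) l.sum rest.sum change month := by
  induction rest with
  | nil => intro l change month; rfl
  | cons x xs ih =>
      intro l change month
      cases xs with
      | nil => rfl
      | cons y ys =>
          simp only [findEarliestMonthGoA, findEarliestMonthGoB, List.sum_cons]
          have hlen : ((l ++ [x]).length : Int) = (l.length : Int) + 1 := by simp
          have hsum : (l ++ [x]).sum = l.sum + x := by simp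
          have hr : x + (y + ys.sum) - x = y + ys.sum := by ring
          rw [hlen, hsum, hr]
          split_ifs with h
          · rw [ih, hlen, hsum]; simp
          · rw [ih, hlen, hsum]; simp

-- ===== VERDICT (by name: the statement is the Claim_ definition above) =====
theorem findEarliestMonth_spec : Claim_equal_findEarliestMonth := by
  intro stockPrice _ _
  unfold Spec_findEarliestMonth findEarliestMonth findEarliestMonth_alt
  cases h : PySem.List.max? stockPrice (fun y => y) with
  | none => rfl
  | some m => simpa using go_eq stockPrice [] m 0
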